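-- pv_equiv track=rewrite | github.com/PSnik-Kostiantyn/SplitBrainDetector | app/model/DataPreparation.py | isSplitBrain
-- ===== SOURCE A (Python) =====
-- def dfs(node, graph, visited, component):
--     visited[node] = True
--     component.append(node)
--     for neighbor, connected in enumerate(graph[node]):
--         if connected and graph[neighbor][node] and not visited[neighbor]:
--             dfs(neighbor, graph, visited, component)
--
-- def find_islands(matrix):
--     n = len(matrix)
--     visited = [False] * n
--     islands = []
--     for node in range(n):
--         if not visited[node]:
--             component = []
--             dfs(node, matrix, visited, component)
--             islands.append(component)
--     return islands
--
-- def isSplitBrain(nodes, matrix):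
--     if isSingleType(nodes):
--         return False
--     node_types = set(node[0] for node in nodes)
--     islands = find_islands(matrix)
--     functional_islands = 0
--     for island in islands:
--         types_present = set(nodes[i][0] for i in island)
--         if node_types.issubset(types_present):
--             functional_islands += 1
--             if functional_islands >= 2:
--                 return True
--     return False
--
-- def isSingleType(nodes):
--     type_counts = {}
--     for node in nodes:
--         type_counts[node[0]] = type_counts.get(node[0], 0) + 1
--     return any(count < 2 for count in type_counts.values())
-- ===== SOURCE B (Python) =====
-- def isSplitBrain(nodes, matrix):
--     type_counts = {}
--     for node in nodes:
--         type_counts[node[0]] = type_counts.get(node[0], 0) + 1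
--     if any(count < 2 for count in type_counts.values()):
--         return False
--     node_types = set(node[0] for node in nodes)
--     n = len(matrix)
--     edge = [[bool(matrix[i][j]) and bool(matrix[j][i]) for j in range(n)] for i in range(n)]
--     visited = [False] * n
--     functional = 0
--     for node in range(n):
--         if visited[node]:
--             continue
--         # boolean reachability row from `node`: expand to a fixed point (at most n rounds)
--         row = [j == node for j in range(n)]
--         for _ in range(n):
--             new = [row[j] or any(row[k] and edge[k][j] for k in range(n)) for j in range(n)]
--             if new == row:
--                 break
--             row = new
--         comp = [j for j in range(n) if row[j]]
--         for j in comp: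
--             visited[j] = True
--         if node_types.issubset(set(nodes[j][0] for j in comp)):
--             functional += 1
--             if functional >= 2:
--                 return True
--     return False
-- ===== Notes on version B (the rewrite author's own statement) =====
-- stated objective: alternative
-- what changed: The recursive DFS with a shared visited list is replaced by a per-root boolean-row reachability closure (fixed-point expansion over the mutual-edge matrix), with island building and functional-island counting fused into one pass over node indices.
-- outside the precondition, e.g. on isSplitBrain(['a1', 'a2'], [[0], [0, 0]]): A returns True, B raises IndexError
import Mathlib
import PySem

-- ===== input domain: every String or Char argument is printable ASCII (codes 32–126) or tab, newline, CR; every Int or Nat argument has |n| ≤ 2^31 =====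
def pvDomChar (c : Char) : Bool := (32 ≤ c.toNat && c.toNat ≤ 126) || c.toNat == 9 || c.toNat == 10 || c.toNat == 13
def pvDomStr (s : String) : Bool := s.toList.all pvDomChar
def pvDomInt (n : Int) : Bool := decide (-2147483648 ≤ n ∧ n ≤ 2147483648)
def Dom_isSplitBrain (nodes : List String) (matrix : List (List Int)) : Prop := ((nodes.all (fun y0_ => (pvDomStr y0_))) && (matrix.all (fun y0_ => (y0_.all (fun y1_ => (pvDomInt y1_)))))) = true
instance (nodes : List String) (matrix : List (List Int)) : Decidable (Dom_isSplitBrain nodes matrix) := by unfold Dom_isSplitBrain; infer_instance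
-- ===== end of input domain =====

-- B replaces the recursive DFS over a shared visited list by a per-root boolean-row
-- reachability closure (fixed-point expansion over a precomputed mutual-edge matrix),
-- fusing island construction and functional-island counting into one pass (objective: alternative).

-- ===== PORT A =====
-- node[0] (a one-character string, modelled as the Char at index 0)
def pvFirst (s : String) : Char := (PySem.Str.pyGet? s 0).getD ' '

-- helper isSingleType
def pvIsSingleType (nodes : List String) : Bool :=
  let d := nodes.foldl (fun d s => PySem.Dict.modify d (pvFirst s) 0 (· + 1))
            (PySem.Dict.empty (κ := Char) (ν := Int))
  (PySem.Dict.values d).any (fun c => decide (c < 2))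

-- helper dfs (recursion made total by a fuel argument; find_islands passes fuel n,
--  which never runs out on a square matrix: the nesting depth is bounded by the
--  number of unvisited entries)
def pvDfsA (graph : List (List Int)) : Nat → Int → List Bool → List Int → List Bool × List Int
  | 0, _, visited, component => (visited, component)
  | fuel + 1, node, visited, component =>
    let visited := PySem.List.pySetD visited node true
    let component := component ++ [node]
    (PySem.List.enumerate (PySem.List.pyGetD graph node []) 0).foldl
      (fun st p =>
        if p.2 ≠ 0 ∧ PySem.List.pyGetD (PySem.List.pyGetD graph p.1 []) node 0 ≠ 0 ∧
            PySem.List.pyGetD st.1 p.1 true = false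
        then pvDfsA graph fuel p.1 st.1 st.2
        else st)
      (visited, component)

-- helper find_islands
def pvFindIslands (matrix : List (List Int)) : List (List Int) :=
  let n := matrix.length
  ((PySem.List.pyRange 0 (n : Int) 1).foldl
    (fun (st : List Bool × List (List Int)) node =>
      if PySem.List.pyGetD st.1 node true = false then
        let r := pvDfsA matrix n node st.1 []
        (r.1, st.2 ++ [r.2])
      else st)
    (List.replicate n false, [])).2

-- the island-counting loop with its early `return True`
def pvCountLoopA (nodeTypes : PySem.Set Char) (nodes : List String) :
    List (List Int) → Int → Bool
  | [], _ => false
  | island :: rest, fi =>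
    let typesPresent : PySem.Set Char :=
      PySem.Set.ofList (island.map (fun i => pvFirst (PySem.List.pyGetD nodes i "")))
    if PySem.Set.issubset nodeTypes typesPresent then
      if fi + 1 ≥ 2 then true else pvCountLoopA nodeTypes nodes rest (fi + 1)
    else pvCountLoopA nodeTypes nodes rest fi

def isSplitBrain (nodes : List String) (matrix : List (List Int)) : Bool :=
  if pvIsSingleType nodes then false
  else
    let nodeTypes : PySem.Set Char := PySem.Set.ofList (nodes.map pvFirst)
    let islands := pvFindIslands matrix
    pvCountLoopA nodeTypes nodes islands 0

-- ===== PORT B =====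
-- edge = [[bool(matrix[i][j]) and bool(matrix[j][i]) for j in range(n)] for i in range(n)]
def pvEdgeB (matrix : List (List Int)) : List (List Bool) :=
  (PySem.List.pyRange 0 (matrix.length : Int) 1).map (fun i =>
    (PySem.List.pyRange 0 (matrix.length : Int) 1).map (fun j =>
      decide (PySem.List.pyGetD (PySem.List.pyGetD matrix i []) j 0 ≠ 0) &&
      decide (PySem.List.pyGetD (PySem.List.pyGetD matrix j []) i 0 ≠ 0)))

-- new = [row[j] or any(row[k] and edge[k][j] for k in range(n)) for j in range(n)]
def pvExpandB (edge : List (List Bool)) (n : Int) (row : List Bool) : List Bool :=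
  (PySem.List.pyRange 0 n 1).map (fun j =>
    PySem.List.pyGetD row j false ||
    (PySem.List.pyRange 0 n 1).any (fun k =>
      PySem.List.pyGetD row k false &&
      PySem.List.pyGetD (PySem.List.pyGetD edge k []) j false))

-- the `for _ in range(n): … if new == row: break` loop
def pvCloseB (edge : List (List Bool)) (n : Int) : Nat → List Bool → List Bool
  | 0, row => row
  | t + 1, row =>
    let new := pvExpandB edge n row
    if new = row then row else pvCloseB edge n t new

-- the main `for node in range(n)` loop, with its early `return True`
def pvLoopB (nodes : List String) (n : Int) (edge : List (List Bool))
    (nodeTypes : PySem.Set Char) : List Int → List Bool → Int → Bool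
  | [], _, _ => false
  | node :: rest, visited, functional =>
    if PySem.List.pyGetD visited node false then pvLoopB nodes n edge nodeTypes rest visited functional
    else
      let row := pvCloseB edge n n.toNat
        ((PySem.List.pyRange 0 n 1).map (fun j => j == node))
      let comp := (PySem.List.pyRange 0 n 1).filter (fun j => PySem.List.pyGetD row j false)
      let visited := comp.foldl (fun v j => PySem.List.pySetD v j true) visited
      if PySem.Set.issubset nodeTypes
          (PySem.Set.ofList (comp.map (fun j => pvFirst (PySem.List.pyGetD nodes j "")))) then
        if functional + 1 ≥ 2 then true
        else pvLoopB nodes n edge nodeTypes rest visited (functional + 1)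
      else pvLoopB nodes n edge nodeTypes rest visited functional

-- Source B inlines the same type-counting loop that A's isSingleType helper runs;
-- its transliteration is the shared helper pvIsSingleType.
def isSplitBrain_alt (nodes : List String) (matrix : List (List Int)) : Bool :=
  if pvIsSingleType nodes then false
  else
    let nodeTypes : PySem.Set Char := PySem.Set.ofList (nodes.map pvFirst)
    let n := matrix.length
    let edge := pvEdgeB matrix
    pvLoopB nodes (n : Int) edge nodeTypes (PySem.List.pyRange 0 (n : Int) 1)
      (List.replicate n false) 0

-- ===== PRECONDITION & SPEC =====
-- Pre_ excludes (a) inputs containing an empty node string, on which A raises IndexError at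
-- node[0], and (b) unless some node type occurs exactly once (then A returns False before
-- touching the matrix), matrices that are not square with side ≤ len(nodes): there A either
-- raises, or returns only because its DFS silently skips entries missing from short rows,
-- while B's natural closure indexes the full square and raises IndexError.
def Pre_isSplitBrain (nodes : List String) (matrix : List (List Int)) : Prop :=
  (∀ s ∈ nodes, s.toList ≠ []) ∧
  (((nodes.map pvFirst).any (fun c => (nodes.map pvFirst).count c == 1)) = true ∨
   (matrix.length ≤ nodes.length ∧ ∀ row ∈ matrix, row.length = matrix.length))
instance (nodes : List String) (matrix : List (List Int)) : Decidable (Pre_isSplitBrain nodes matrix) := by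
  unfold Pre_isSplitBrain; infer_instance

def pvWitness_isSplitBrain : List String × List (List Int) :=
  (["ax", "ay", "bx", "by"], [])

def Spec_isSplitBrain (nodes : List String) (matrix : List (List Int)) (out : Bool) : Prop := out = isSplitBrain_alt nodes matrix
instance (nodes : List String) (matrix : List (List Int)) (out : Bool) : Decidable (Spec_isSplitBrain nodes matrix out) := by unfold Spec_isSplitBrain; infer_instance

-- ===== CLAIM (what is proved, stated in full; the proofs are below) =====
def Claim_equal_isSplitBrain : Prop := ∀ (nodes : List String) (matrix : List (List Int)), Dom_isSplitBrain nodes matrix → Pre_isSplitBrain nodes matrix → Spec_isSplitBrain nodes matrix (isSplitBrain nodes matrix)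

-- ===== LEMMAS AND PROOFS =====

-- (proof-layer definitions)

-- membership in a visited row: visited[x] is True
def pvMv (v : List Bool) (x : Int) : Prop := PySem.List.pyGetD v x false = true

-- the mutual-edge relation of `g` (indices in range, both directions truthy)
def pvE (g : List (List Int)) (a b : Int) : Prop :=
  0 ≤ a ∧ a < (g.length : Int) ∧ 0 ≤ b ∧ b < (g.length : Int) ∧
  PySem.List.pyGetD (PySem.List.pyGetD g a []) b 0 ≠ 0 ∧
  PySem.List.pyGetD (PySem.List.pyGetD g b []) a 0 ≠ 0

def pvConn (g : List (List Int)) : Int → Int → Prop := Relation.ReflTransGen (pvE g)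

-- reachability avoiding the visited set v
def pvRA (g : List (List Int)) (v : List Bool) : Int → Int → Prop :=
  Relation.ReflTransGen (fun a b => pvE g a b ∧ ¬ pvMv v b)

def pvSq (g : List (List Int)) : Prop := ∀ row ∈ g, row.length = g.length

def pvClosed (g : List (List Int)) (v : List Bool) : Prop :=
  ∀ x y, pvMv v x → pvE g x y → pvMv v y

-- number of False entries of a visited row (the DFS fuel measure)
def pvCF (v : List Bool) : Nat :=
  ((Finset.range v.length).filter (fun k => v.getD k false = false)).card

-- number of True entries of a row (the closure-progress measure)
def pvCT (v : List Bool) : Nat :=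
  ((Finset.range v.length).filter (fun k => v.getD k false = true)).card

-- the closure row / component / marking / subset test of port B, as named pieces
def pvRowC (g : List (List Int)) (u : Int) : List Bool :=
  pvCloseB (pvEdgeB g) (g.length : Int) ((g.length : Int)).toNat
    ((PySem.List.pyRange 0 (g.length : Int) 1).map (fun j => j == u))

def pvCompC (g : List (List Int)) (u : Int) : List Int :=
  (PySem.List.pyRange 0 (g.length : Int) 1).filter
    (fun j => PySem.List.pyGetD (pvRowC g u) j false)

def pvMark (v : List Bool) (comp : List Int) : List Bool :=
  comp.foldl (fun v j => PySem.List.pySetD v j true) v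

def pvP (t : PySem.Set Char) (nodes : List String) (l : List Int) : Bool :=
  PySem.Set.issubset t
    (PySem.Set.ofList (l.map (fun j => pvFirst (PySem.List.pyGetD nodes j ""))))

-- the number of functional islands produced from the yet-unvisited roots of L
def pvCntF (g : List (List Int)) (t : PySem.Set Char) (nodes : List String) :
    List Int → List Bool → Nat
  | [], _ => 0
  | u :: rest, v =>
    if PySem.List.pyGetD v u false then pvCntF g t nodes rest v
    else (if pvP t nodes (pvCompC g u) then 1 else 0) +
      pvCntF g t nodes rest (pvMark v (pvCompC g u))

-- the body of A's inner DFS loop / of A's outer find_islands loop, as named steps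
def pvDfsStep (g : List (List Int)) (fuel : Nat) (u : Int) :
    (List Bool × List Int) → (Int × Int) → (List Bool × List Int) :=
  fun st p =>
    if p.2 ≠ 0 ∧ PySem.List.pyGetD (PySem.List.pyGetD g p.1 []) u 0 ≠ 0 ∧
        PySem.List.pyGetD st.1 p.1 true = false
    then pvDfsA g fuel p.1 st.1 st.2 else st

def pvIslStep (g : List (List Int)) :
    (List Bool × List (List Int)) → Int → (List Bool × List (List Int)) :=
  fun st node =>
    if PySem.List.pyGetD st.1 node true = false then
      ((pvDfsA g g.length node st.1 []).1, st.2 ++ [(pvDfsA g g.length node st.1 []).2])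
    else st

-- (basic bridges)

lemma pv_bool_eq_of_iff {a b : Bool} (h : a = true ↔ b = true) : a = b := by
  cases a <;> cases b <;> simp_all

lemma pv_getD_nonneg {α : Type} (v : List α) (x : Int) (hx : 0 ≤ x) (d : α) :
    PySem.List.pyGetD v x d = v.getD x.toNat d := by
  obtain ⟨m, rfl⟩ := Int.eq_ofNat_of_zero_le hx
  simp

lemma pv_getD_true_false (v : List Bool) (x : Int) (hx : 0 ≤ x) (hxl : x.toNat < v.length) :
    PySem.List.pyGetD v x true = PySem.List.pyGetD v x false := by
  rw [pv_getD_nonneg v x hx, pv_getD_nonneg v x hx,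
    List.getD_eq_getElem v true hxl, List.getD_eq_getElem v false hxl]

lemma pv_list_eq_of_getD (v w : List Bool) (hl : v.length = w.length)
    (h : ∀ k, k < v.length → v.getD k false = w.getD k false) : v = w := by
  apply List.ext_getElem hl
  intro k h1 h2
  have hk := h k h1
  rwa [List.getD_eq_getElem v false h1, List.getD_eq_getElem w false h2] at hk

lemma pv_Mv_iff_getD (v : List Bool) (x : Int) (hx : 0 ≤ x) :
    pvMv v x ↔ v.getD x.toNat false = true := by
  unfold pvMv; rw [pv_getD_nonneg v x hx]

lemma pv_Mv_natCast (v : List Bool) (k : Nat) :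
    pvMv v (k : Int) ↔ v.getD k false = true := by
  unfold pvMv; simp

lemma pv_Mv_replicate (len : Nat) (x : Int) (hx : 0 ≤ x) :
    ¬ pvMv (List.replicate len false) x := by
  rw [pv_Mv_iff_getD _ _ hx]
  simp [List.getD_eq_getElem?_getD, List.getElem?_replicate]
  split <;> simp

lemma pv_Mv_set (v : List Bool) (u x : Int) (hu : 0 ≤ u) (hx : 0 ≤ x)
    (hxl : x.toNat < v.length) :
    pvMv (v.set u.toNat true) x ↔ x = u ∨ pvMv v x := by
  rw [pv_Mv_iff_getD _ _ hx, pv_Mv_iff_getD _ _ hx,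
    List.getD_eq_getElem _ _ (by simpa using hxl),
    List.getD_eq_getElem _ _ hxl, List.getElem_set]
  by_cases he : u.toNat = x.toNat
  · have : x = u := by omega
    simp [he, this]
  · have hne : ¬ x = u := by omega
    simp [he, hne]

-- (edge-relation basics)

lemma pv_E_bounds {g : List (List Int)} {a b : Int} (h : pvE g a b) :
    0 ≤ a ∧ a < (g.length : Int) ∧ 0 ≤ b ∧ b < (g.length : Int) :=
  ⟨h.1, h.2.1, h.2.2.1, h.2.2.2.1⟩

lemma pv_E_symm {g : List (List Int)} {a b : Int} (h : pvE g a b) : pvE g b a :=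
  ⟨h.2.2.1, h.2.2.2.1, h.1, h.2.1, h.2.2.2.2.2, h.2.2.2.2.1⟩

lemma pv_conn_bounds {g : List (List Int)} {u x : Int}
    (hu : 0 ≤ u ∧ u < (g.length : Int)) (h : pvConn g u x) :
    0 ≤ x ∧ x < (g.length : Int) := by
  rcases h.cases_tail with rfl | ⟨c, _, hcx⟩
  · exact hu
  · have hb := pv_E_bounds hcx; exact ⟨hb.2.2.1, hb.2.2.2⟩

lemma pv_RA_to_conn {g : List (List Int)} {v : List Bool} {u x : Int}
    (h : pvRA g v u x) : pvConn g u x :=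
  Relation.ReflTransGen.mono (fun _ _ hab => hab.1) h

lemma pv_RA_antitone {g : List (List Int)} {v v' : List Bool}
    (hsub : ∀ b : Int, 0 ≤ b → b < (g.length : Int) → pvMv v b → pvMv v' b)
    {q x : Int} (h : pvRA g v' q x) : pvRA g v q x := by
  refine Relation.ReflTransGen.mono ?_ h
  intro a b hab
  refine ⟨hab.1, fun hm => hab.2 ?_⟩
  have hb := pv_E_bounds hab.1
  exact hsub b hb.2.2.1 hb.2.2.2 hm

lemma pv_RA_split {g : List (List Int)} {v v' : List Bool} {p1 : Int}
    (hchar : ∀ x : Int, 0 ≤ x → x < (g.length : Int) →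
      (pvMv v' x ↔ pvMv v x ∨ pvRA g v p1 x))
    {q x : Int} (h : pvRA g v q x) : pvRA g v' q x ∨ pvRA g v p1 x := by
  induction h with
  | refl => exact Or.inl Relation.ReflTransGen.refl
  | @tail b c hqb hbc ih =>
    rcases ih with hq' | hp
    · by_cases hm : pvMv v' c
      · have hcb := pv_E_bounds hbc.1
        rcases (hchar c hcb.2.2.1 hcb.2.2.2).mp hm with hvc | hra
        · exact absurd hvc hbc.2
        · exact Or.inr hra
      · exact Or.inl (hq'.tail ⟨hbc.1, hm⟩)
    · exact Or.inr (hp.tail hbc)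

lemma pv_RA_decompose {g : List (List Int)} {v v1 : List Bool} {u : Int}
    (hvu : ¬ pvMv v u)
    (hv1 : ∀ b : Int, 0 ≤ b → b < (g.length : Int) → (pvMv v1 b ↔ b = u ∨ pvMv v b))
    (x : Int) :
    pvRA g v u x ↔ (x = u ∨ ∃ j : Int, pvE g u j ∧ ¬ pvMv v1 j ∧ pvRA g v1 j x) := by
  constructor
  · intro h
    induction h with
    | refl => exact Or.inl rfl
    | @tail b c hub hbc ih =>
      by_cases hc : c = u
      · exact Or.inl hc
      · have hcb := pv_E_bounds hbc.1
        have hnc1 : ¬ pvMv v1 c := by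
          rw [hv1 c hcb.2.2.1 hcb.2.2.2]
          rintro (h | hm)
          · exact hc h
          · exact hbc.2 hm
        rcases ih with rfl | ⟨j, hj1, hj2, hj3⟩
        · exact Or.inr ⟨c, hbc.1, hnc1, Relation.ReflTransGen.refl⟩
        · exact Or.inr ⟨j, hj1, hj2, hj3.tail ⟨hbc.1, hnc1⟩⟩
  · rintro (rfl | ⟨j, hj1, hj2, hj3⟩)
    · exact Relation.ReflTransGen.refl
    · have hjb := pv_E_bounds hj1
      have hnvj : ¬ pvMv v j := fun hm => hj2 ((hv1 j hjb.2.2.1 hjb.2.2.2).mpr (Or.inr hm))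
      have step1 : pvRA g v u j := Relation.ReflTransGen.single ⟨hj1, hnvj⟩
      have h2 : pvRA g v j x :=
        pv_RA_antitone (fun b hb0 hbN hm => (hv1 b hb0 hbN).mpr (Or.inr hm)) hj3
      exact step1.trans h2

lemma pv_conn_avoids {g : List (List Int)} {v : List Bool} (hcl : pvClosed g v)
    {u : Int} (hvu : ¬ pvMv v u) :
    ∀ x, pvConn g u x → ¬ pvMv v x ∧ pvRA g v u x := by
  intro x h
  induction h with
  | refl => exact ⟨hvu, Relation.ReflTransGen.refl⟩
  | @tail b c hub hbc ih =>
    have hnc : ¬ pvMv v c := fun hm => ih.1 (hcl c b hm (pv_E_symm hbc))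
    exact ⟨hnc, ih.2.tail ⟨hbc, hnc⟩⟩

lemma pv_RA_iff_conn {g : List (List Int)} {v : List Bool} (hcl : pvClosed g v)
    {u : Int} (hvu : ¬ pvMv v u) (x : Int) :
    pvRA g v u x ↔ pvConn g u x :=
  ⟨pv_RA_to_conn, fun h => (pv_conn_avoids hcl hvu x h).2⟩

lemma pv_closed_replicate (g : List (List Int)) (len : Nat) :
    pvClosed g (List.replicate len false) := by
  intro x y hm he
  have hb := pv_E_bounds he
  exact absurd hm (pv_Mv_replicate len x hb.1)

lemma pv_closed_union {g : List (List Int)} {v w : List Bool} (hcl : pvClosed g v) {u : Int}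
    (hw : ∀ x : Int, 0 ≤ x → x < (g.length : Int) → (pvMv w x ↔ pvMv v x ∨ pvConn g u x)) :
    pvClosed g w := by
  intro x y hm he
  have hbx := pv_E_bounds he
  rw [hw x hbx.1 hbx.2.1] at hm
  rw [hw y hbx.2.2.1 hbx.2.2.2]
  rcases hm with hv | hc
  · exact Or.inl (hcl x y hv he)
  · exact Or.inr (hc.tail he)

-- (counting measures)

lemma pv_CF_le_len (v : List Bool) : pvCF v ≤ v.length := by
  unfold pvCF
  calc ((Finset.range v.length).filter (fun k => v.getD k false = false)).card
      ≤ (Finset.range v.length).card := Finset.card_filter_le _ _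
    _ = v.length := Finset.card_range _

lemma pv_CF_pos {v : List Bool} {x : Int} (hx : 0 ≤ x) (hxl : x.toNat < v.length)
    (h : ¬ pvMv v x) : 0 < pvCF v := by
  have hfalse : v.getD x.toNat false = false := by
    cases hb : v.getD x.toNat false with
    | false => rfl
    | true => exact absurd ((pv_Mv_iff_getD v x hx).mpr hb) h
  exact Finset.card_pos.mpr ⟨x.toNat, Finset.mem_filter.mpr ⟨Finset.mem_range.mpr hxl, hfalse⟩⟩

lemma pv_CF_mono {v w : List Bool} (hl : w.length = v.length)
    (hmono : ∀ k, k < v.length → v.getD k false = true → w.getD k false = true) :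
    pvCF w ≤ pvCF v := by
  unfold pvCF
  rw [hl]
  apply Finset.card_le_card
  intro k hk
  rw [Finset.mem_filter] at hk ⊢
  refine ⟨hk.1, ?_⟩
  cases hb : v.getD k false with
  | false => rfl
  | true =>
    have h2 := hmono k (Finset.mem_range.mp hk.1) hb
    rw [hk.2] at h2; exact absurd h2 (by simp)

lemma pv_CF_set_lt {v : List Bool} {k : Nat} (hk : k < v.length)
    (h : v.getD k false = false) : pvCF (v.set k true) < pvCF v := by
  unfold pvCF
  rw [List.length_set]
  apply Finset.card_lt_card
  rw [Finset.ssubset_def]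
  constructor
  · intro m hm
    rw [Finset.mem_filter] at hm ⊢
    refine ⟨hm.1, ?_⟩
    have hmlt := Finset.mem_range.mp hm.1
    by_cases he : k = m
    · subst he
      have h2 : (v.set k true).getD k false = true := by
        rw [List.getD_eq_getElem _ _ (by simpa using hmlt), List.getElem_set]
        simp
      rw [hm.2] at h2; exact absurd h2 (by simp)
    · have h2 : (v.set k true).getD m false = v.getD m false := by
        rw [List.getD_eq_getElem _ _ (by simpa using hmlt),
          List.getD_eq_getElem _ _ hmlt, List.getElem_set]
        simp [he]
      rw [← h2]; exact hm.2
  · intro hsub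
    have hkmem : k ∈ (Finset.range v.length).filter (fun m => v.getD m false = false) :=
      Finset.mem_filter.mpr ⟨Finset.mem_range.mpr hk, h⟩
    have h3 := hsub hkmem
    rw [Finset.mem_filter] at h3
    have h2 : (v.set k true).getD k false = true := by
      rw [List.getD_eq_getElem _ _ (by simpa using hk), List.getElem_set]; simp
    rw [h3.2] at h2; exact absurd h2 (by simp)

lemma pv_CT_le_len (v : List Bool) : pvCT v ≤ v.length := by
  unfold pvCT
  calc ((Finset.range v.length).filter (fun k => v.getD k false = true)).card
      ≤ (Finset.range v.length).card := Finset.card_filter_le _ _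
    _ = v.length := Finset.card_range _

lemma pv_CT_pos {v : List Bool} {k : Nat} (hk : k < v.length) (h : v.getD k false = true) :
    1 ≤ pvCT v :=
  Finset.card_pos.mpr ⟨k, Finset.mem_filter.mpr ⟨Finset.mem_range.mpr hk, h⟩⟩

lemma pv_CT_lt {v w : List Bool} (hl : w.length = v.length)
    (hmono : ∀ k, k < v.length → v.getD k false = true → w.getD k false = true)
    (hne : v ≠ w) : pvCT v < pvCT w := by
  unfold pvCT
  rw [hl]
  apply Finset.card_lt_card
  rw [Finset.ssubset_def]
  constructor
  · intro k hk
    rw [Finset.mem_filter] at hk ⊢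
    exact ⟨hk.1, hmono k (Finset.mem_range.mp hk.1) hk.2⟩
  · intro hsub
    apply hne
    apply pv_list_eq_of_getD v w hl.symm
    intro k hklt
    cases hb : v.getD k false with
    | true => rw [hmono k hklt hb]
    | false =>
      cases hb2 : w.getD k false with
      | false => rfl
      | true =>
        exfalso
        have h3 := hsub (Finset.mem_filter.mpr ⟨Finset.mem_range.mpr hklt, hb2⟩)
        rw [Finset.mem_filter, hb] at h3
        exact absurd h3.2 (by simp)

-- (the edge table of port B)

lemma pv_edge_entry (g : List (List Int)) (a b : Int)
    (ha0 : 0 ≤ a) (ha : a < (g.length : Int)) (hb0 : 0 ≤ b) (hb : b < (g.length : Int)) :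
    PySem.List.pyGetD (PySem.List.pyGetD (pvEdgeB g) a []) b false =
      (decide (PySem.List.pyGetD (PySem.List.pyGetD g a []) b 0 ≠ 0) &&
       decide (PySem.List.pyGetD (PySem.List.pyGetD g b []) a 0 ≠ 0)) := by
  unfold pvEdgeB
  rw [PySem.List.pyGetD_map_pyRange_of_nonneg _ _ _ _ ha0 ha,
    PySem.List.pyGetD_map_pyRange_of_nonneg _ _ _ _ hb0 hb]

lemma pv_edge_iff (g : List (List Int)) (a b : Int)
    (ha0 : 0 ≤ a) (ha : a < (g.length : Int)) (hb0 : 0 ≤ b) (hb : b < (g.length : Int)) :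
    (PySem.List.pyGetD (PySem.List.pyGetD (pvEdgeB g) a []) b false = true) ↔ pvE g a b := by
  rw [pv_edge_entry g a b ha0 ha hb0 hb]
  unfold pvE
  simp only [Bool.and_eq_true, decide_eq_true_eq]
  constructor
  · rintro ⟨h1, h2⟩
    exact ⟨ha0, ha, hb0, hb, h1, h2⟩
  · rintro ⟨_, _, _, _, h1, h2⟩
    exact ⟨h1, h2⟩

-- (the expansion step and the closure loop of port B)

lemma pv_length_expand (e : List (List Bool)) (n : Int) (row : List Bool) :
    (pvExpandB e n row).length = n.toNat := by
  unfold pvExpandB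
  rw [List.length_map, PySem.List.length_pyRange_one]
  simp

lemma pv_expand_iff (g : List (List Int)) (row : List Bool) (j : Int)
    (hj0 : 0 ≤ j) (hj : j < (g.length : Int)) :
    pvMv (pvExpandB (pvEdgeB g) (g.length : Int) row) j ↔
      pvMv row j ∨ ∃ k : Int, pvMv row k ∧ pvE g k j := by
  unfold pvMv pvExpandB
  rw [PySem.List.pyGetD_map_pyRange_of_nonneg _ _ _ _ hj0 hj]
  simp only [Bool.or_eq_true, List.any_eq_true, Bool.and_eq_true]
  constructor
  · rintro (h | ⟨k, hkmem, hk1, hk2⟩)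
    · exact Or.inl h
    · have hkb := PySem.List.mem_pyRange_one.mp hkmem
      exact Or.inr ⟨k, hk1, (pv_edge_iff g k j hkb.1 hkb.2 hj0 hj).mp hk2⟩
  · rintro (h | ⟨k, hk1, hk2⟩)
    · exact Or.inl h
    · have hkb := pv_E_bounds hk2
      exact Or.inr ⟨k, PySem.List.mem_pyRange_one.mpr ⟨hkb.1, hkb.2.1⟩, hk1,
        (pv_edge_iff g k j hkb.1 hkb.2.1 hj0 hj).mpr hk2⟩

lemma pv_close_mono (g : List (List Int)) :
    ∀ (fuel : Nat) (row : List Bool) (x : Int),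
      0 ≤ x → x < (g.length : Int) → pvMv row x →
      pvMv (pvCloseB (pvEdgeB g) (g.length : Int) fuel row) x := by
  intro fuel
  induction fuel with
  | zero => intro row x hx0 hx hm; exact hm
  | succ t ih =>
    intro row x hx0 hx hm
    simp only [pvCloseB]
    split
    · exact hm
    · exact ih _ x hx0 hx ((pv_expand_iff g row x hx0 hx).mpr (Or.inl hm))

lemma pv_close_sound (g : List (List Int)) (u : Int) :
    ∀ (fuel : Nat) (row : List Bool),
      (∀ x : Int, 0 ≤ x → x < (g.length : Int) → pvMv row x → pvConn g u x) →
      ∀ x : Int, 0 ≤ x → x < (g.length : Int) →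
      pvMv (pvCloseB (pvEdgeB g) (g.length : Int) fuel row) x → pvConn g u x := by
  intro fuel
  induction fuel with
  | zero => intro row hs x hx0 hx hm; exact hs x hx0 hx hm
  | succ t ih =>
    intro row hs x hx0 hx hm
    simp only [pvCloseB] at hm
    split at hm
    · exact hs x hx0 hx hm
    · refine ih _ ?_ x hx0 hx hm
      intro y hy0 hy hmy
      rcases (pv_expand_iff g row y hy0 hy).mp hmy with h1 | ⟨k, hk1, hk2⟩
      · exact hs y hy0 hy h1
      · have hkb := pv_E_bounds hk2
        exact (hs k hkb.1 hkb.2.1 hk1).tail hk2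

lemma pv_close_stable (g : List (List Int)) :
    ∀ (fuel : Nat) (row : List Bool), row.length = g.length →
      g.length + 1 ≤ pvCT row + fuel →
      pvExpandB (pvEdgeB g) (g.length : Int)
          (pvCloseB (pvEdgeB g) (g.length : Int) fuel row)
        = pvCloseB (pvEdgeB g) (g.length : Int) fuel row := by
  intro fuel
  induction fuel with
  | zero =>
    intro row h hf
    exfalso
    have h2 := pv_CT_le_len row
    rw [h] at h2
    omega
  | succ t ih =>
    intro row h hf
    simp only [pvCloseB]
    split
    · next hnew => exact hnew
    · next hnew =>
      apply ih
      · rw [pv_length_expand]; simp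
      · have hlt : pvCT row < pvCT (pvExpandB (pvEdgeB g) (g.length : Int) row) := by
          apply pv_CT_lt
          · rw [pv_length_expand]; simp [h]
          · intro k hk hkt
            have hkN : (k : Int) < (g.length : Int) := by
              rw [h] at hk; exact_mod_cast hk
            have h1 : pvMv row (k : Int) := (pv_Mv_natCast row k).mpr hkt
            have h2 := (pv_expand_iff g row (k : Int) (by positivity) hkN).mpr (Or.inl h1)
            exact (pv_Mv_natCast _ k).mp h2
          · exact fun hEq => hnew (hEq.symm)
        omega

-- (the initial one-hot row)

lemma pv_init_length (g : List (List Int)) (u : Int) :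
    (((PySem.List.pyRange 0 (g.length : Int) 1).map (fun j => j == u)) : List Bool).length
      = g.length := by
  rw [List.length_map, PySem.List.length_pyRange_one]
  simp

lemma pv_init_iff (g : List (List Int)) (u x : Int) (hx0 : 0 ≤ x) (hx : x < (g.length : Int)) :
    pvMv ((PySem.List.pyRange 0 (g.length : Int) 1).map (fun j => j == u)) x ↔ x = u := by
  unfold pvMv
  rw [PySem.List.pyGetD_map_pyRange_of_nonneg _ _ _ _ hx0 hx]
  simp

-- (the closure row computes the connected component)

lemma pv_row_sound (g : List (List Int)) (u : Int) (_hu0 : 0 ≤ u) (_hu : u < (g.length : Int)) :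
    ∀ x : Int, 0 ≤ x → x < (g.length : Int) → pvMv (pvRowC g u) x → pvConn g u x := by
  intro x hx0 hx hm
  refine pv_close_sound g u _ _ ?_ x hx0 hx hm
  intro y hy0 hy hmy
  rw [pv_init_iff g u y hy0 hy] at hmy
  exact hmy ▸ Relation.ReflTransGen.refl

lemma pv_row_complete (g : List (List Int)) (u : Int)
    (hu0 : 0 ≤ u) (hu : u < (g.length : Int)) :
    ∀ x : Int, pvConn g u x → pvMv (pvRowC g u) x := by
  have hutl : u.toNat < g.length := by omega
  have hinit : pvMv ((PySem.List.pyRange 0 (g.length : Int) 1).map (fun j => j == u)) u :=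
    (pv_init_iff g u u hu0 hu).mpr rfl
  have hct : 1 ≤ pvCT ((PySem.List.pyRange 0 (g.length : Int) 1).map (fun j => j == u)) := by
    apply pv_CT_pos (k := u.toNat)
    · rw [pv_init_length]; exact hutl
    · exact (pv_Mv_iff_getD _ u hu0).mp hinit
  have hstab := pv_close_stable g ((g.length : Int)).toNat _ (pv_init_length g u)
    (by simp; omega)
  intro x hconn
  induction hconn with
  | refl => exact pv_close_mono g _ _ u hu0 hu hinit
  | @tail b c hub hbc ih =>
    have hcb := pv_E_bounds hbc
    have hmb : pvMv (pvRowC g u) b := ih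
    have : pvMv (pvExpandB (pvEdgeB g) (g.length : Int) (pvRowC g u)) c :=
      (pv_expand_iff g _ c hcb.2.2.1 hcb.2.2.2).mpr (Or.inr ⟨b, hmb, hbc⟩)
    rw [pvRowC] at this ⊢
    rwa [hstab] at this

lemma pv_comp_mem (g : List (List Int)) (u : Int)
    (hu0 : 0 ≤ u) (hu : u < (g.length : Int)) (x : Int) :
    x ∈ pvCompC g u ↔ pvConn g u x := by
  unfold pvCompC
  rw [List.mem_filter]
  constructor
  · rintro ⟨hmem, hrow⟩
    have hb := PySem.List.mem_pyRange_one.mp hmem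
    exact pv_row_sound g u hu0 hu x hb.1 hb.2 hrow
  · intro hconn
    have hb := pv_conn_bounds ⟨hu0, hu⟩ hconn
    exact ⟨PySem.List.mem_pyRange_one.mpr ⟨hb.1, hb.2⟩, pv_row_complete g u hu0 hu x hconn⟩

-- (marking a component in the visited list)

lemma pv_mark_length : ∀ (comp : List Int) (v : List Bool), (∀ j ∈ comp, 0 ≤ j) →
    (pvMark v comp).length = v.length := by
  intro comp
  induction comp with
  | nil => intro v _; rfl
  | cons j rest ih =>
    intro v hj
    have hj0 := hj j List.mem_cons_self
    simp only [pvMark, List.foldl_cons]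
    rw [show (rest.foldl (fun v j => PySem.List.pySetD v j true)
        (PySem.List.pySetD v j true)) = pvMark (PySem.List.pySetD v j true) rest from rfl]
    rw [ih _ (fun q hq => hj q (List.mem_cons_of_mem _ hq))]
    rw [PySem.List.pySetD_of_nonneg v true hj0, List.length_set]

lemma pv_mark_mem : ∀ (comp : List Int) (v : List Bool) (x : Int),
    (∀ j ∈ comp, 0 ≤ j ∧ j.toNat < v.length) → 0 ≤ x → x.toNat < v.length →
    (pvMv (pvMark v comp) x ↔ pvMv v x ∨ x ∈ comp) := by
  intro comp
  induction comp with
  | nil => intro v x _ _ _; simp [pvMark]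
  | cons j rest ih =>
    intro v x hj hx0 hxl
    have hj0 := (hj j List.mem_cons_self).1
    have hjl := (hj j List.mem_cons_self).2
    simp only [pvMark, List.foldl_cons]
    rw [show (rest.foldl (fun v j => PySem.List.pySetD v j true)
        (PySem.List.pySetD v j true)) = pvMark (PySem.List.pySetD v j true) rest from rfl]
    rw [PySem.List.pySetD_of_nonneg v true hj0]
    rw [ih (v.set j.toNat true) x
      (by intro q hq
          have hq2 := hj q (List.mem_cons_of_mem _ hq)
          exact ⟨hq2.1, by rw [List.length_set]; exact hq2.2⟩)
      hx0 (by rw [List.length_set]; exact hxl)]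
    rw [pv_Mv_set v j x hj0 hx0 hxl]
    simp only [List.mem_cons]
    tauto

-- (DFS correctness)

lemma pv_dfsA_succ (g : List (List Int)) (fuel : Nat) (u : Int) (v : List Bool) (c : List Int) :
    pvDfsA g (fuel + 1) u v c =
      (PySem.List.enumerate (PySem.List.pyGetD g u []) 0).foldl (pvDfsStep g fuel u)
        (PySem.List.pySetD v u true, c ++ [u]) := rfl

set_option maxHeartbeats 1000000 in
lemma pv_dfs_fold (g : List (List Int)) (fuel : Nat) (u : Int)
    (IH : ∀ (j : Int) (v : List Bool) (c : List Int),
        0 ≤ j → j < (g.length : Int) → v.length = g.length → ¬ pvMv v j → pvCF v ≤ fuel →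
        (pvDfsA g fuel j v c).1.length = g.length ∧
        (∀ x : Int, 0 ≤ x → x < (g.length : Int) →
          (pvMv (pvDfsA g fuel j v c).1 x ↔ pvMv v x ∨ pvRA g v j x)) ∧
        (∀ x : Int, x ∈ (pvDfsA g fuel j v c).2 ↔ x ∈ c ∨ pvRA g v j x)) :
    ∀ (L : List (Int × Int)) (v : List Bool) (c : List Int),
      (∀ p ∈ L, 0 ≤ p.1 ∧ p.1 < (g.length : Int) ∧
        ((p.2 ≠ 0 ∧ PySem.List.pyGetD (PySem.List.pyGetD g p.1 []) u 0 ≠ 0) ↔ pvE g u p.1)) →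
      v.length = g.length → pvCF v ≤ fuel →
      (L.foldl (pvDfsStep g fuel u) (v, c)).1.length = g.length ∧
      (∀ x : Int, 0 ≤ x → x < (g.length : Int) →
        (pvMv (L.foldl (pvDfsStep g fuel u) (v, c)).1 x ↔
          pvMv v x ∨ ∃ p ∈ L, pvE g u p.1 ∧ ¬ pvMv v p.1 ∧ pvRA g v p.1 x)) ∧
      (∀ x : Int, x ∈ (L.foldl (pvDfsStep g fuel u) (v, c)).2 ↔
        x ∈ c ∨ ∃ p ∈ L, pvE g u p.1 ∧ ¬ pvMv v p.1 ∧ pvRA g v p.1 x) ∧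
      pvCF (L.foldl (pvDfsStep g fuel u) (v, c)).1 ≤ pvCF v := by
  intro L
  induction L with
  | nil =>
    intro v c _ hvl _
    simp only [List.foldl_nil]
    refine ⟨hvl, ?_, ?_, le_refl _⟩
    · intro x _ _
      constructor
      · exact fun h => Or.inl h
      · rintro (h | ⟨p, hp, -⟩)
        · exact h
        · exact absurd hp (by simp)
    · intro x
      constructor
      · exact fun h => Or.inl h
      · rintro (h | ⟨p, hp, -⟩)
        · exact h
        · exact absurd hp (by simp)
  | cons p rest ihL =>
    intro v c hL hvl hcf
    have hp := hL p List.mem_cons_self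
    have hrest : ∀ q ∈ rest, 0 ≤ q.1 ∧ q.1 < (g.length : Int) ∧
        ((q.2 ≠ 0 ∧ PySem.List.pyGetD (PySem.List.pyGetD g q.1 []) u 0 ≠ 0) ↔ pvE g u q.1) :=
      fun q hq => hL q (List.mem_cons_of_mem _ hq)
    rw [List.foldl_cons]
    by_cases hE : pvE g u p.1
    case neg =>
      have hstep : pvDfsStep g fuel u (v, c) p = (v, c) := by
        unfold pvDfsStep
        rw [if_neg]
        intro hcond
        exact hE (hp.2.2.mp ⟨hcond.1, hcond.2.1⟩)
      rw [hstep]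
      obtain ⟨h1, h2, h3, h4⟩ := ihL v c hrest hvl hcf
      refine ⟨h1, ?_, ?_, h4⟩
      · intro x hx0 hx
        rw [h2 x hx0 hx, List.exists_mem_cons_iff]
        have hnC : ¬ (pvE g u p.1 ∧ ¬ pvMv v p.1 ∧ pvRA g v p.1 x) := fun h => hE h.1
        constructor
        · rintro (h | h)
          · exact Or.inl h
          · exact Or.inr (Or.inr h)
        · rintro (h | hCp | h)
          · exact Or.inl h
          · exact absurd hCp hnC
          · exact Or.inr h
      · intro x
        rw [h3 x, List.exists_mem_cons_iff]
        have hnC : ¬ (pvE g u p.1 ∧ ¬ pvMv v p.1 ∧ pvRA g v p.1 x) := fun h => hE h.1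
        constructor
        · rintro (h | h)
          · exact Or.inl h
          · exact Or.inr (Or.inr h)
        · rintro (h | hCp | h)
          · exact Or.inl h
          · exact absurd hCp hnC
          · exact Or.inr h
    case pos =>
      have hp1tl : p.1.toNat < v.length := by rw [hvl]; omega
      by_cases hvis : pvMv v p.1
      · have hstep : pvDfsStep g fuel u (v, c) p = (v, c) := by
          unfold pvDfsStep
          rw [if_neg]
          intro hcond
          rw [pv_getD_true_false v p.1 hp.1 hp1tl] at hcond
          unfold pvMv at hvis
          rw [hvis] at hcond
          exact absurd hcond.2.2 (by simp)
        rw [hstep]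
        obtain ⟨h1, h2, h3, h4⟩ := ihL v c hrest hvl hcf
        refine ⟨h1, ?_, ?_, h4⟩
        · intro x hx0 hx
          rw [h2 x hx0 hx, List.exists_mem_cons_iff]
          have hnC : ¬ (pvE g u p.1 ∧ ¬ pvMv v p.1 ∧ pvRA g v p.1 x) := fun h => h.2.1 hvis
          constructor
          · rintro (h | h)
            · exact Or.inl h
            · exact Or.inr (Or.inr h)
          · rintro (h | hCp | h)
            · exact Or.inl h
            · exact absurd hCp hnC
            · exact Or.inr h
        · intro x
          rw [h3 x, List.exists_mem_cons_iff]
          have hnC : ¬ (pvE g u p.1 ∧ ¬ pvMv v p.1 ∧ pvRA g v p.1 x) := fun h => h.2.1 hvis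
          constructor
          · rintro (h | h)
            · exact Or.inl h
            · exact Or.inr (Or.inr h)
          · rintro (h | hCp | h)
            · exact Or.inl h
            · exact absurd hCp hnC
            · exact Or.inr h
      · have hguard : PySem.List.pyGetD v p.1 true = false := by
          rw [pv_getD_true_false v p.1 hp.1 hp1tl]
          cases hb : PySem.List.pyGetD v p.1 false with
          | false => rfl
          | true => exact absurd hb hvis
        have hstep : pvDfsStep g fuel u (v, c) p = pvDfsA g fuel p.1 v c := by
          unfold pvDfsStep
          rw [if_pos ⟨(hp.2.2.mpr hE).1, (hp.2.2.mpr hE).2, hguard⟩]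
        rw [hstep]
        obtain ⟨d1, d2, d3⟩ := IH p.1 v c hp.1 hp.2.1 hvl hvis hcf
        have hsub : ∀ b : Int, 0 ≤ b → b < (g.length : Int) → pvMv v b →
            pvMv (pvDfsA g fuel p.1 v c).1 b :=
          fun b h1 h2 hm => (d2 b h1 h2).mpr (Or.inl hm)
        have hcf' : pvCF (pvDfsA g fuel p.1 v c).1 ≤ pvCF v := by
          apply pv_CF_mono (by rw [d1, hvl])
          intro k hk hkt
          have hkN : (k : Int) < (g.length : Int) := by rw [hvl] at hk; exact_mod_cast hk
          have h1 : pvMv v (k : Int) := (pv_Mv_natCast v k).mpr hkt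
          exact (pv_Mv_natCast _ k).mp (hsub (k : Int) (by positivity) hkN h1)
        obtain ⟨f1, f2, f3, f4⟩ := ihL (pvDfsA g fuel p.1 v c).1 (pvDfsA g fuel p.1 v c).2
          hrest d1 (le_trans hcf' hcf)
        refine ⟨f1, ?_, ?_, le_trans f4 hcf'⟩
        · intro x hx0 hx
          rw [f2 x hx0 hx, List.exists_mem_cons_iff, d2 x hx0 hx]
          constructor
          · rintro ((h | h) | ⟨q, hq, hq1, hq2, hq3⟩)
            · exact Or.inl h
            · exact Or.inr (Or.inl ⟨hE, hvis, h⟩)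
            · have hqb := pv_E_bounds hq1
              exact Or.inr (Or.inr ⟨q, hq, hq1,
                fun hm => hq2 (hsub q.1 hqb.2.2.1 hqb.2.2.2 hm), pv_RA_antitone hsub hq3⟩)
          · rintro (h | hC | ⟨q, hq, hq1, hq2, hq3⟩)
            · exact Or.inl (Or.inl h)
            · exact Or.inl (Or.inr hC.2.2)
            · rcases pv_RA_split (fun y hy0 hy => d2 y hy0 hy) hq3 with hra' | hrap
              · by_cases hm : pvMv (pvDfsA g fuel p.1 v c).1 q.1
                · have hqb := pv_E_bounds hq1
                  rcases (d2 q.1 hqb.2.2.1 hqb.2.2.2).mp hm with hv | hrapq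
                  · exact absurd hv hq2
                  · exact Or.inl (Or.inr (hrapq.trans hq3))
                · exact Or.inr ⟨q, hq, hq1, hm, hra'⟩
              · exact Or.inl (Or.inr hrap)
        · intro x
          rw [f3 x, List.exists_mem_cons_iff, d3 x]
          constructor
          · rintro ((h | h) | ⟨q, hq, hq1, hq2, hq3⟩)
            · exact Or.inl h
            · exact Or.inr (Or.inl ⟨hE, hvis, h⟩)
            · have hqb := pv_E_bounds hq1
              exact Or.inr (Or.inr ⟨q, hq, hq1,
                fun hm => hq2 (hsub q.1 hqb.2.2.1 hqb.2.2.2 hm), pv_RA_antitone hsub hq3⟩)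
          · rintro (h | hC | ⟨q, hq, hq1, hq2, hq3⟩)
            · exact Or.inl (Or.inl h)
            · exact Or.inl (Or.inr hC.2.2)
            · rcases pv_RA_split (fun y hy0 hy => d2 y hy0 hy) hq3 with hra' | hrap
              · by_cases hm : pvMv (pvDfsA g fuel p.1 v c).1 q.1
                · have hqb := pv_E_bounds hq1
                  rcases (d2 q.1 hqb.2.2.1 hqb.2.2.2).mp hm with hv | hrapq
                  · exact absurd hv hq2
                  · exact Or.inl (Or.inr (hrapq.trans hq3))
                · exact Or.inr ⟨q, hq, hq1, hm, hra'⟩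
              · exact Or.inl (Or.inr hrap)

set_option maxHeartbeats 1000000 in
lemma pv_dfs_spec (g : List (List Int)) (hsq : pvSq g) :
    ∀ (fuel : Nat) (u : Int) (v : List Bool) (c : List Int),
      0 ≤ u → u < (g.length : Int) → v.length = g.length → ¬ pvMv v u → pvCF v ≤ fuel →
      (pvDfsA g fuel u v c).1.length = g.length ∧
      (∀ x : Int, 0 ≤ x → x < (g.length : Int) →
        (pvMv (pvDfsA g fuel u v c).1 x ↔ pvMv v x ∨ pvRA g v u x)) ∧
      (∀ x : Int, x ∈ (pvDfsA g fuel u v c).2 ↔ x ∈ c ∨ pvRA g v u x) := by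
  intro fuel
  induction fuel with
  | zero =>
    intro u v c hu0 hu hvl hvu hcf
    exfalso
    have hutl : u.toNat < v.length := by rw [hvl]; omega
    have := pv_CF_pos hu0 hutl hvu
    omega
  | succ fuel ih =>
    intro u v c hu0 hu hvl hvu hcf
    rw [pv_dfsA_succ]
    have hutl : u.toNat < v.length := by rw [hvl]; omega
    have hrowl : (PySem.List.pyGetD g u []).length = g.length := by
      rw [pv_getD_nonneg g u hu0]
      rw [List.getD_eq_getElem g [] (show u.toNat < g.length by omega)]
      exact hsq _ (List.getElem_mem _)
    have hL : ∀ p ∈ PySem.List.enumerate (PySem.List.pyGetD g u []) 0,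
        0 ≤ p.1 ∧ p.1 < (g.length : Int) ∧
        ((p.2 ≠ 0 ∧ PySem.List.pyGetD (PySem.List.pyGetD g p.1 []) u 0 ≠ 0) ↔ pvE g u p.1) := by
      intro p hp
      obtain ⟨k, hk, rfl⟩ := (PySem.List.mem_enumerate_iff _ _ _).mp hp
      simp only [zero_add]
      have hkN : (k : Int) < (g.length : Int) := by rw [hrowl] at hk; exact_mod_cast hk
      have hval : PySem.List.pyGetD (PySem.List.pyGetD g u []) ((k : Int)) 0 =
          (PySem.List.pyGetD g u [])[k] := by
        rw [pv_getD_nonneg _ _ (by positivity)]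
        simp only [Int.toNat_natCast]
        exact List.getD_eq_getElem _ 0 hk
      refine ⟨by positivity, hkN, ?_⟩
      unfold pvE
      constructor
      · rintro ⟨h1, h2⟩
        exact ⟨hu0, hu, by positivity, hkN, by rw [hval]; exact h1, h2⟩
      · rintro ⟨-, -, -, -, h5, h6⟩
        refine ⟨?_, h6⟩
        rw [hval] at h5
        exact h5
    have hcover : ∀ j : Int, 0 ≤ j → j < (g.length : Int) →
        ∃ p ∈ PySem.List.enumerate (PySem.List.pyGetD g u []) 0, p.1 = j := by
      intro j hj0 hj
      have hjk : j.toNat < (PySem.List.pyGetD g u []).length := by rw [hrowl]; omega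
      exact ⟨((0 : Int) + (j.toNat : Int), (PySem.List.pyGetD g u [])[j.toNat]),
        (PySem.List.mem_enumerate_iff _ _ _).mpr ⟨j.toNat, hjk, rfl⟩, by simp; omega⟩
    have hv1l : (PySem.List.pySetD v u true).length = g.length := by
      rw [PySem.List.pySetD_of_nonneg v true hu0, List.length_set]; exact hvl
    have hvu' : v.getD u.toNat false = false := by
      cases hb : v.getD u.toNat false with
      | false => rfl
      | true => exact absurd ((pv_Mv_iff_getD v u hu0).mpr hb) hvu
    have hcf1 : pvCF (PySem.List.pySetD v u true) ≤ fuel := by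
      rw [PySem.List.pySetD_of_nonneg v true hu0]
      have := pv_CF_set_lt hutl hvu'
      omega
    have hv1iff : ∀ b : Int, 0 ≤ b → b < (g.length : Int) →
        (pvMv (PySem.List.pySetD v u true) b ↔ b = u ∨ pvMv v b) := by
      intro b hb0 hb
      rw [PySem.List.pySetD_of_nonneg v true hu0]
      exact pv_Mv_set v u b hu0 hb0 (by rw [hvl]; omega)
    obtain ⟨f1, f2, f3, _⟩ := pv_dfs_fold g fuel u ih
      (PySem.List.enumerate (PySem.List.pyGetD g u []) 0)
      (PySem.List.pySetD v u true) (c ++ [u]) hL hv1l hcf1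
    refine ⟨f1, ?_, ?_⟩
    · intro x hx0 hx
      rw [f2 x hx0 hx, pv_RA_decompose hvu hv1iff x]
      constructor
      · rintro (h1 | ⟨p, hpmem, hEp, hnm, hra⟩)
        · rcases (hv1iff x hx0 hx).mp h1 with rfl | hmv
          · exact Or.inr (Or.inl rfl)
          · exact Or.inl hmv
        · exact Or.inr (Or.inr ⟨p.1, hEp, hnm, hra⟩)
      · rintro (h | rfl | ⟨j, hj1, hj2, hj3⟩)
        · exact Or.inl ((hv1iff x hx0 hx).mpr (Or.inr h))
        · exact Or.inl ((hv1iff x hx0 hx).mpr (Or.inl rfl))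
        · have hjb := pv_E_bounds hj1
          obtain ⟨p, hpmem, hpj⟩ := hcover j hjb.2.2.1 hjb.2.2.2
          refine Or.inr ⟨p, hpmem, ?_, ?_, ?_⟩ <;> rw [hpj] <;> assumption
    · intro x
      rw [f3 x, pv_RA_decompose hvu hv1iff x]
      simp only [List.mem_append, List.mem_singleton]
      constructor
      · rintro ((h | h) | ⟨p, hpmem, hEp, hnm, hra⟩)
        · exact Or.inl h
        · exact Or.inr (Or.inl h)
        · exact Or.inr (Or.inr ⟨p.1, hEp, hnm, hra⟩)
      · rintro (h | h | ⟨j, hj1, hj2, hj3⟩)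
        · exact Or.inl (Or.inl h)
        · exact Or.inl (Or.inr h)
        · have hjb := pv_E_bounds hj1
          obtain ⟨p, hpmem, hpj⟩ := hcover j hjb.2.2.1 hjb.2.2.2
          refine Or.inr ⟨p, hpmem, ?_, ?_, ?_⟩ <;> rw [hpj] <;> assumption

lemma pv_dfs_conn (g : List (List Int)) (hsq : pvSq g) (u : Int) (v : List Bool)
    (hu0 : 0 ≤ u) (hu : u < (g.length : Int)) (hvl : v.length = g.length)
    (hcl : pvClosed g v) (hvu : ¬ pvMv v u) :
    (pvDfsA g g.length u v []).1.length = g.length ∧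
    (∀ x : Int, 0 ≤ x → x < (g.length : Int) →
      (pvMv (pvDfsA g g.length u v []).1 x ↔ pvMv v x ∨ pvConn g u x)) ∧
    (∀ x : Int, x ∈ (pvDfsA g g.length u v []).2 ↔ pvConn g u x) := by
  have hcf : pvCF v ≤ g.length := hvl ▸ pv_CF_le_len v
  obtain ⟨d1, d2, d3⟩ := pv_dfs_spec g hsq g.length u v [] hu0 hu hvl hvu hcf
  refine ⟨d1, ?_, ?_⟩
  · intro x hx0 hx
    rw [d2 x hx0 hx, pv_RA_iff_conn hcl hvu x]
  · intro x
    rw [d3 x, pv_RA_iff_conn hcl hvu x]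
    simp

-- (both counting loops compute `at least two functional islands`)

lemma pv_P_congr (t : PySem.Set Char) (nodes : List String) (l1 l2 : List Int)
    (h : ∀ x, x ∈ l1 ↔ x ∈ l2) : pvP t nodes l1 = pvP t nodes l2 := by
  apply pv_bool_eq_of_iff
  unfold pvP
  rw [PySem.Set.issubset_iff, PySem.Set.issubset_iff]
  constructor
  · intro hs c hc
    have h2 := hs c hc
    rw [PySem.Set.mem_ofList, List.mem_map] at h2
    rw [PySem.Set.mem_ofList, List.mem_map]
    obtain ⟨x, hx, rfl⟩ := h2
    exact ⟨x, (h x).mp hx, rfl⟩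
  · intro hs c hc
    have h2 := hs c hc
    rw [PySem.Set.mem_ofList, List.mem_map] at h2
    rw [PySem.Set.mem_ofList, List.mem_map]
    obtain ⟨x, hx, rfl⟩ := h2
    exact ⟨x, (h x).mpr hx, rfl⟩

lemma pv_findIslands_eq (matrix : List (List Int)) :
    pvFindIslands matrix =
      ((PySem.List.pyRange 0 (matrix.length : Int) 1).foldl (pvIslStep matrix)
        (List.replicate matrix.length false, [])).2 := rfl

set_option maxHeartbeats 1000000 in
lemma pv_A2 (g : List (List Int)) (hsq : pvSq g) (t : PySem.Set Char) (nodes : List String) :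
    ∀ (L : List Int) (v : List Bool) (acc : List (List Int)),
      (∀ x ∈ L, 0 ≤ x ∧ x < (g.length : Int)) → v.length = g.length → pvClosed g v →
      ((L.foldl (pvIslStep g) (v, acc)).2).countP (fun isl => pvP t nodes isl) =
        acc.countP (fun isl => pvP t nodes isl) + pvCntF g t nodes L v := by
  intro L
  induction L with
  | nil => intro v acc _ _ _; simp [pvCntF]
  | cons u rest ih =>
    intro v acc hL hvl hcl
    have hu := hL u List.mem_cons_self
    have hutl : u.toNat < v.length := by rw [hvl]; omega
    rw [List.foldl_cons]
    by_cases hvis : pvMv v u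
    · have hguard : ¬ (PySem.List.pyGetD v u true = false) := by
        rw [pv_getD_true_false v u hu.1 hutl]
        unfold pvMv at hvis
        rw [hvis]; simp
      have hstep : pvIslStep g (v, acc) u = (v, acc) := by
        unfold pvIslStep; rw [if_neg hguard]
      rw [hstep, ih v acc (fun q hq => hL q (List.mem_cons_of_mem _ hq)) hvl hcl]
      have hc : pvCntF g t nodes (u :: rest) v = pvCntF g t nodes rest v := by
        simp only [pvCntF]
        rw [if_pos (show PySem.List.pyGetD v u false = true from hvis)]
      rw [hc]
    · have hguard : PySem.List.pyGetD v u true = false := by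
        rw [pv_getD_true_false v u hu.1 hutl]
        cases hb : PySem.List.pyGetD v u false with
        | false => rfl
        | true => exact absurd hb hvis
      have hstep : pvIslStep g (v, acc) u =
          ((pvDfsA g g.length u v []).1, acc ++ [(pvDfsA g g.length u v []).2]) := by
        unfold pvIslStep; rw [if_pos hguard]
      rw [hstep]
      obtain ⟨d1, d2, d3⟩ := pv_dfs_conn g hsq u v hu.1 hu.2 hvl hcl hvis
      have hcompb : ∀ j ∈ pvCompC g u, 0 ≤ j ∧ j.toNat < v.length := by
        intro j hj
        have hb := pv_conn_bounds ⟨hu.1, hu.2⟩ ((pv_comp_mem g u hu.1 hu.2 j).mp hj)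
        exact ⟨hb.1, by rw [hvl]; omega⟩
      have hmlen : (pvMark v (pvCompC g u)).length = g.length := by
        rw [pv_mark_length _ _ (fun j hj => (hcompb j hj).1), hvl]
      have hmiff : ∀ x : Int, 0 ≤ x → x < (g.length : Int) →
          (pvMv (pvMark v (pvCompC g u)) x ↔ pvMv v x ∨ pvConn g u x) := by
        intro x hx0 hx
        rw [pv_mark_mem (pvCompC g u) v x hcompb hx0 (by rw [hvl]; omega),
          pv_comp_mem g u hu.1 hu.2 x]
      have hmark : (pvDfsA g g.length u v []).1 = pvMark v (pvCompC g u) := by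
        apply pv_list_eq_of_getD
        · rw [d1, hmlen]
        · intro k hk
          have hkl : k < g.length := by rw [d1] at hk; exact hk
          have hkN : (k : Int) < (g.length : Int) := by exact_mod_cast hkl
          apply pv_bool_eq_of_iff
          rw [← pv_Mv_natCast, ← pv_Mv_natCast,
            d2 (k : Int) (by positivity) hkN, hmiff (k : Int) (by positivity) hkN]
      rw [hmark]
      rw [ih (pvMark v (pvCompC g u)) (acc ++ [(pvDfsA g g.length u v []).2])
        (fun q hq => hL q (List.mem_cons_of_mem _ hq)) hmlen
        (pv_closed_union hcl hmiff)]
      simp only [List.countP_append, List.countP_singleton]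
      have hP : pvP t nodes (pvDfsA g g.length u v []).2 = pvP t nodes (pvCompC g u) := by
        apply pv_P_congr
        intro x
        rw [d3 x, pv_comp_mem g u hu.1 hu.2 x]
      have hc : pvCntF g t nodes (u :: rest) v =
          (if pvP t nodes (pvCompC g u) = true then 1 else 0) +
            pvCntF g t nodes rest (pvMark v (pvCompC g u)) := by
        simp only [pvCntF]
        rw [if_neg (show ¬ (PySem.List.pyGetD v u false = true) from hvis)]
      rw [hc, hP]
      omega

lemma pv_A1 (t : PySem.Set Char) (nodes : List String) :
    ∀ (l : List (List Int)) (fi : Int), fi < 2 →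
      pvCountLoopA t nodes l fi =
        decide (2 ≤ fi + (l.countP (fun isl => pvP t nodes isl) : Int)) := by
  intro l
  induction l with
  | nil =>
    intro fi hfi
    simp only [pvCountLoopA, List.countP_nil]
    symm
    rw [decide_eq_false_iff_not]
    push_cast
    omega
  | cons isl rest ih =>
    intro fi hfi
    have hdef : pvCountLoopA t nodes (isl :: rest) fi =
        if pvP t nodes isl then
          (if fi + 1 ≥ 2 then true else pvCountLoopA t nodes rest (fi + 1))
        else pvCountLoopA t nodes rest fi := rfl
    rw [hdef, List.countP_cons]
    by_cases hP : pvP t nodes isl = true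
    · rw [if_pos hP]
      by_cases h2 : fi + 1 ≥ 2
      · rw [if_pos h2]
        symm
        rw [decide_eq_true_eq, if_pos hP]
        push_cast
        omega
      · rw [if_neg h2, ih (fi + 1) (by omega), decide_eq_decide, if_pos hP]
        push_cast
        omega
    · rw [if_neg hP, ih fi hfi, decide_eq_decide, if_neg hP]
      push_cast
      omega

lemma pv_loopB_cons (g : List (List Int)) (nodes : List String) (t : PySem.Set Char)
    (u : Int) (rest : List Int) (v : List Bool) (fi : Int) :
    pvLoopB nodes (g.length : Int) (pvEdgeB g) t (u :: rest) v fi =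
      if PySem.List.pyGetD v u false then
        pvLoopB nodes (g.length : Int) (pvEdgeB g) t rest v fi
      else
        if pvP t nodes (pvCompC g u) then
          if fi + 1 ≥ 2 then true
          else pvLoopB nodes (g.length : Int) (pvEdgeB g) t rest (pvMark v (pvCompC g u)) (fi + 1)
        else pvLoopB nodes (g.length : Int) (pvEdgeB g) t rest (pvMark v (pvCompC g u)) fi := rfl

lemma pv_B1 (g : List (List Int)) (nodes : List String) (t : PySem.Set Char) :
    ∀ (L : List Int) (v : List Bool) (fi : Int), fi < 2 →
      pvLoopB nodes (g.length : Int) (pvEdgeB g) t L v fi =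
        decide (2 ≤ fi + (pvCntF g t nodes L v : Int)) := by
  intro L
  induction L with
  | nil =>
    intro v fi hfi
    simp only [pvLoopB, pvCntF]
    symm
    rw [decide_eq_false_iff_not]
    push_cast
    omega
  | cons u rest ih =>
    intro v fi hfi
    rw [pv_loopB_cons]
    by_cases hvis : PySem.List.pyGetD v u false = true
    · rw [if_pos hvis, ih v fi hfi]
      have hc : pvCntF g t nodes (u :: rest) v = pvCntF g t nodes rest v := by
        simp only [pvCntF]; rw [if_pos hvis]
      rw [hc]
    · rw [if_neg hvis]
      by_cases hP : pvP t nodes (pvCompC g u) = true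
      · rw [if_pos hP]
        have hc : pvCntF g t nodes (u :: rest) v =
            1 + pvCntF g t nodes rest (pvMark v (pvCompC g u)) := by
          simp only [pvCntF]; rw [if_neg hvis, if_pos hP]
        by_cases h2 : fi + 1 ≥ 2
        · rw [if_pos h2]
          symm
          rw [decide_eq_true_eq, hc]
          push_cast
          omega
        · rw [if_neg h2, ih _ (fi + 1) (by omega), hc, decide_eq_decide]
          push_cast
          omega
      · rw [if_neg hP, ih _ fi hfi]
        have hc : pvCntF g t nodes (u :: rest) v =
            pvCntF g t nodes rest (pvMark v (pvCompC g u)) := by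
          simp only [pvCntF]; rw [if_neg hvis, if_neg hP]; simp
        rw [hc]

-- (the single-type test counts first characters)

lemma pv_single_iff (nodes : List String) :
    pvIsSingleType nodes = true ↔
      ∃ c ∈ nodes.map pvFirst, (nodes.map pvFirst).count c = 1 := by
  simp only [pvIsSingleType]
  have hfold : nodes.foldl (fun d s => PySem.Dict.modify d (pvFirst s) 0 (· + 1))
      (PySem.Dict.empty (κ := Char) (ν := Int)) = PySem.Dict.counter (nodes.map pvFirst) := by
    rw [PySem.Dict.counter_eq_foldl, List.foldl_map]
  rw [hfold]
  have hvals : PySem.Dict.values (PySem.Dict.counter (nodes.map pvFirst)) =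
      (PySem.Set.ofList (nodes.map pvFirst)).map
        (fun k => (((nodes.map pvFirst).count k : Nat) : Int)) := by
    show (PySem.Dict.counter (nodes.map pvFirst)).items.map (·.2) = _
    rw [PySem.Dict.items_counter]
    simp
  rw [hvals, List.any_map, List.any_eq_true]
  constructor
  · rintro ⟨k, hk, hdec⟩
    have hmem := (PySem.Set.mem_ofList _ _).mp hk
    simp only [Function.comp_apply, decide_eq_true_eq] at hdec
    have hpos : 0 < (nodes.map pvFirst).count k := List.count_pos_iff.mpr hmem
    exact ⟨k, hmem, by omega⟩
  · rintro ⟨c, hc, hcount⟩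
    refine ⟨c, (PySem.Set.mem_ofList _ _).mpr hc, ?_⟩
    simp only [Function.comp_apply, decide_eq_true_eq]
    rw [hcount]
    norm_num

-- ===== VERDICT (by name: the statement is the Claim_ definition above) =====
set_option maxHeartbeats 1000000 in
theorem isSplitBrain_spec : Claim_equal_isSplitBrain := by
  intro nodes matrix hdom hpre
  unfold Spec_isSplitBrain
  obtain ⟨hne, hdisj⟩ := hpre
  by_cases hs : pvIsSingleType nodes = true
  · show isSplitBrain nodes matrix = isSplitBrain_alt nodes matrix
    simp only [isSplitBrain, isSplitBrain_alt]
    rw [if_pos hs, if_pos hs]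
  · have hsq : pvSq matrix := by
      rcases hdisj with hsing | hsq
      · refine absurd ((pv_single_iff nodes).mpr ?_) hs
        rw [List.any_eq_true] at hsing
        obtain ⟨c, hc, hcc⟩ := hsing
        exact ⟨c, hc, by simpa using hcc⟩
      · exact fun row hr => hsq.2 row hr
    show isSplitBrain nodes matrix = isSplitBrain_alt nodes matrix
    simp only [isSplitBrain, isSplitBrain_alt]
    rw [if_neg hs, if_neg hs]
    rw [pv_A1 _ _ _ 0 (by norm_num)]
    rw [pv_B1 matrix nodes _ _ _ 0 (by norm_num)]
    rw [pv_findIslands_eq]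
    rw [pv_A2 matrix hsq _ nodes _ _ []
      (fun x hx => ⟨(PySem.List.mem_pyRange_one.mp hx).1, (PySem.List.mem_pyRange_one.mp hx).2⟩)
      (by simp) (pv_closed_replicate matrix matrix.length)]
    rw [decide_eq_decide]
    simp
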